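-- pv_equiv track=rewrite | github.com/xcy103/personal_python_algorithm_note | ZUO/贪心贪心！！！/91/LongestSameZerosOnes.py | len2
-- ===== SOURCE A (Python) =====
-- def len2(arr):
--     left_zero = -1
--     right_zero = -1
--     left_one = -1
--     right_one = -1
--
--     # 找最左 0
--     for i in range(len(arr)):
--         if arr[i] == 0:
--             left_zero = i
--             break
--
--     # 找最左 1
--     for i in range(len(arr)):
--         if arr[i] == 1:
--             left_one = i
--             break
--
--     # 找最右 0
--     for i in range(len(arr) - 1, -1, -1):
--         if arr[i] == 0:
--             right_zero = i
--             break
--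
--     # 找最右 1
--     for i in range(len(arr) - 1, -1, -1):
--         if arr[i] == 1:
--             right_one = i
--             break
--
--     p1 = right_zero - left_zero
--     p2 = right_one - left_one
--
--     return max(p1, p2)
-- ===== SOURCE B (Python) =====
-- def len2(arr):
--     # single forward pass maintaining first/last indices of 0 and of 1
--     left_zero = right_zero = left_one = right_one = -1
--     for i in range(len(arr)):
--         x = arr[i]
--         if x == 0:
--             if left_zero == -1:
--                 left_zero = i
--             right_zero = i
--         elif x == 1:
--             if left_one == -1:
--                 left_one = i
--             right_one = i
--     return max(right_zero - left_zero, right_one - left_one)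
-- ===== Notes on version B (the rewrite author's own statement) =====
-- stated objective: alternative
-- what changed: Replaces A's four separate directional scans (two forward, two backward, each with break) by one forward pass maintaining first/last indices of 0 and 1 simultaneously.
import Mathlib
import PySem

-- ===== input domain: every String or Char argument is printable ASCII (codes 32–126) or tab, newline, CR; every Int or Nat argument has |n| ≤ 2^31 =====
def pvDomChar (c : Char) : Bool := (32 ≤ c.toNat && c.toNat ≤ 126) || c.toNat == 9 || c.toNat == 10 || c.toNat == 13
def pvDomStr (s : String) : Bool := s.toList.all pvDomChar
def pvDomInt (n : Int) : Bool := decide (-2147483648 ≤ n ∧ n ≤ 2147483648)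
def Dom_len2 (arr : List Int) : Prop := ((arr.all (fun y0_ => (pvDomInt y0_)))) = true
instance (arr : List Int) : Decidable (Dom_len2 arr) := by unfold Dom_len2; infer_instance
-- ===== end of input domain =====

-- B replaces A's four directional scans by one forward pass keeping first/last markers (alternative decomposition, same cost).

-- ===== PORT A =====
-- forward scan with break: 'for i in range(len(arr)): if arr[i]==v: res=i; break'
def len2_leftFind (v : Int) : List Int → Int → Int
  | [], _ => -1
  | x :: xs, i => if x = v then i else len2_leftFind v xs (i + 1)

-- backward scan with break: 'for i in range(len(arr)-1,-1,-1): if arr[i]==v: res=i; break'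
-- (the reversed traversal is the loop over arr.reverse with the index counting down)
def len2_rightFind (v : Int) : List Int → Int → Int
  | [], _ => -1
  | x :: xs, i => if x = v then i else len2_rightFind v xs (i - 1)

def len2 (arr : List Int) : Int :=
  let left_zero := len2_leftFind 0 arr 0
  let left_one := len2_leftFind 1 arr 0
  let right_zero := len2_rightFind 0 arr.reverse ((arr.length : Int) - 1)
  let right_one := len2_rightFind 1 arr.reverse ((arr.length : Int) - 1)
  let p1 := right_zero - left_zero
  let p2 := right_one - left_one
  max p1 p2

-- ===== PORT B =====
-- the single forward loop of Source B: index i plus state (left_zero, right_zero, left_one, right_one)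
def len2_bLoop : List Int → Int → Int × Int × Int × Int → Int × Int × Int × Int
  | [], _, st => st
  | x :: xs, i, (lz, rz, lo, ro) =>
    len2_bLoop xs (i + 1)
      (if x = 0 then ((if lz = -1 then i else lz), i, lo, ro)
       else if x = 1 then (lz, rz, (if lo = -1 then i else lo), i)
       else (lz, rz, lo, ro))

def len2_alt (arr : List Int) : Int :=
  let s := len2_bLoop arr 0 (-1, -1, -1, -1)
  max (s.2.1 - s.1) (s.2.2.2 - s.2.2.1)

-- ===== PRECONDITION & SPEC =====
def Spec_len2 (arr : List Int) (out : Int) : Prop := out = len2_alt arr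
instance (arr : List Int) (out : Int) : Decidable (Spec_len2 arr out) := by unfold Spec_len2; infer_instance

-- ===== CLAIM (what is proved, stated in full; the proofs are below) =====
def Claim_equal_len2 : Prop := ∀ (arr : List Int), Dom_len2 arr → Spec_len2 arr (len2 arr)

-- ===== LEMMAS AND PROOFS =====

-- last index of v in xs, positions counted from i; -1 if absent
def lastIdx (v : Int) : List Int → Int → Int
  | [], _ => -1
  | x :: xs, i =>
    let r := lastIdx v xs (i + 1)
    if r = -1 then (if x = v then i else -1) else r

theorem rightFind_append (v : Int) (as : List Int) : ∀ (bs : List Int) (j : Int),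
    (as.length : Int) ≤ j + 1 →
    len2_rightFind v (as ++ bs) j =
      if len2_rightFind v as j = -1 then len2_rightFind v bs (j - as.length)
      else len2_rightFind v as j := by
  induction as with
  | nil => intro bs j _; simp [len2_rightFind]
  | cons a as ih =>
    intro bs j hj
    simp only [List.cons_append, len2_rightFind]
    by_cases hav : a = v
    · have hj0 : (0 : Int) ≤ j := by
        have := as.length.cast_nonneg (α := Int); simp at hj; omega
      simp [hav, show j ≠ -1 by omega]
    · have hj' : (as.length : Int) ≤ (j - 1) + 1 := by simp at hj; omega
      rw [if_neg hav, if_neg hav, ih bs (j - 1) hj']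
      have : j - 1 - (as.length : Int) = j - ((a :: as).length : Int) := by
        simp; ring
      rw [this]

theorem rightFind_rev (v : Int) (xs : List Int) : ∀ (i : Int), 0 ≤ i →
    len2_rightFind v xs.reverse (i + (xs.length : Int) - 1) = lastIdx v xs i := by
  induction xs with
  | nil => intro i _; simp [len2_rightFind, lastIdx]
  | cons x t ih =>
    intro i hi
    have hlen : (t.reverse.length : Int) ≤ (i + ((x :: t).length : Int) - 1) + 1 := by
      simp; omega
    rw [List.reverse_cons, rightFind_append v t.reverse [x] _ hlen]
    have hidx : i + ((x :: t).length : Int) - 1 = (i + 1) + (t.length : Int) - 1 := by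
      simp; ring
    rw [hidx, ih (i + 1) (by omega)]
    have hsub : (i + 1) + (t.length : Int) - 1 - (t.reverse.length : Int) = i := by
      simp; ring
    simp only [hsub, lastIdx, len2_rightFind]

theorem if_collapse (r ro : Int) :
    (if r = -1 then ro else if r = -1 then -1 else r) = (if r = -1 then ro else r) := by
  by_cases h : r = -1 <;> simp [h]

theorem bLoop_spec (xs : List Int) : ∀ (i lz rz lo ro : Int), 0 ≤ i →
    len2_bLoop xs i (lz, rz, lo, ro) =
      ((if lz = -1 then len2_leftFind 0 xs i else lz),
       (if lastIdx 0 xs i = -1 then rz else lastIdx 0 xs i),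
       (if lo = -1 then len2_leftFind 1 xs i else lo),
       (if lastIdx 1 xs i = -1 then ro else lastIdx 1 xs i)) := by
  induction xs with
  | nil => intro i lz rz lo ro _; simp [len2_bLoop, len2_leftFind, lastIdx]
  | cons x t ih =>
    intro i lz rz lo ro hi
    have hi1 : (0 : Int) ≤ i + 1 := by omega
    have hine : i ≠ -1 := by omega
    by_cases h0 : x = 0
    · simp only [len2_bLoop, h0, ih (i + 1) _ _ _ _ hi1]
      simp only [len2_leftFind, lastIdx]
      by_cases hlz : lz = -1 <;>
        by_cases hr : lastIdx 0 t (i + 1) = -1 <;>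
          simp [hlz, hr, hine, if_collapse]
    · by_cases h1 : x = 1
      · simp only [len2_bLoop, h1, ih (i + 1) _ _ _ _ hi1]
        simp only [len2_leftFind, lastIdx, h0, if_neg (by simp [h1] : ¬(1:Int) = 0)]
        by_cases hlo : lo = -1 <;>
          by_cases hr : lastIdx 1 t (i + 1) = -1 <;>
            simp [hlo, hr, hine, if_collapse]
      · simp only [len2_bLoop, if_neg h0, if_neg h1, ih (i + 1) _ _ _ _ hi1]
        simp [len2_leftFind, lastIdx, h0, h1, if_collapse]

-- ===== VERDICT (by name: the statement is the Claim_ definition above) =====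
theorem len2_spec : Claim_equal_len2 := by
  intro arr _
  unfold Spec_len2 len2 len2_alt
  rw [bLoop_spec arr 0 (-1) (-1) (-1) (-1) le_rfl]
  have h0 := rightFind_rev 0 arr 0 le_rfl
  have h1 := rightFind_rev 1 arr 0 le_rfl
  simp only [zero_add] at h0 h1
  rw [h0, h1]
  by_cases hz : lastIdx 0 arr 0 = -1 <;>
    by_cases ho : lastIdx 1 arr 0 = -1 <;>
      simp [hz, ho]
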